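-- pv_equiv track=rewrite | github.com/s-zhang/puzzlehunt-tools | puzzle-utils/words/dropquote.py | dropquote_locate_word
-- ===== SOURCE A (Python) =====
-- def dropquote_locate_word(grid, letters, word_index):
--     grid[-1] += '-'
--
--     index = 0
--     new = True
--     found = False
--     for row in range(len(grid)):
--         for column in range(len(grid[row])):
--             if grid[row][column] == '-':
--                 if new == False:
--                     index += 1
--                     new = True
--             else:
--                 if new == True and index == word_index:
--                     found = True
--                     break
--
--                 new = False
--
--         if found == True:
--             break
--
--     grid[-1] = grid[-1][:-1]
--
--     if found == False:
--         raise ValueError('The word index is greater than the number of words.')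
--
--     return row, column
-- ===== SOURCE B (Python) =====
-- def dropquote_locate_word(grid, letters, word_index):
--     s = ''.join(grid)
--     starts = [i for i, (prev, ch) in enumerate(zip('-' + s, s))
--               if ch != '-' and prev == '-']
--     if not 0 <= word_index < len(starts):
--         raise ValueError('The word index is greater than the number of words.')
--     p = starts[word_index]
--     for r, row in enumerate(grid):
--         if p < len(row):
--             return r, p
--         p -= len(row)
-- ===== Notes on version B (the rewrite author's own statement) =====
-- stated objective: idiomatic
-- what changed: Replaces A's mutate-the-grid cell-by-cell state machine (new/found flags, nested breaks) by one flat pass: concatenate the rows, collect all word-start offsets with a comprehension over zip('-'+s, s), index the wanted one, and map the flat offset back to (row, col) by walking the row lengths; no mutation of grid.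
import Mathlib
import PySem

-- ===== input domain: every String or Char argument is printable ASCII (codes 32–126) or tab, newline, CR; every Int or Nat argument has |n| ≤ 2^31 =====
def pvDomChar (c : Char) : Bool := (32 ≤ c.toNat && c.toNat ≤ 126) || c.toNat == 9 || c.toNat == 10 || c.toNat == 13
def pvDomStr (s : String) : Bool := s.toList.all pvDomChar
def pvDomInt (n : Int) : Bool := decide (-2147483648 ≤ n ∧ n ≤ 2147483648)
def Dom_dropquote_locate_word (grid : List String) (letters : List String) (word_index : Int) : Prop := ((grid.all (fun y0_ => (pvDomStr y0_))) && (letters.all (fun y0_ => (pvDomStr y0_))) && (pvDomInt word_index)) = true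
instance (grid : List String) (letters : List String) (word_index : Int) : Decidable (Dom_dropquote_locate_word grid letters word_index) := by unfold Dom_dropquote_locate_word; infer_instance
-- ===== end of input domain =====

-- B changes the decomposition: one flat scan for word-start offsets plus an offset→(row,col) walk,
-- instead of A's mutating nested-loop state machine; return value only (A temporarily mutates grid
-- but restores it, so there is no net mutation to mirror).

-- ===== PORT A =====
-- inner loop of A: for column in range(len(grid[row])): …  (returns found column or updated state)
def aInner (t : List Char) (c : Int) (index : Int) (new : Bool) (wi : Int) :
    Option Int × Int × Bool :=
  match t with
  | [] => (none, index, new)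
  | ch :: rest =>
    if ch = '-' then
      if new = false then aInner rest (c + 1) (index + 1) true wi
      else aInner rest (c + 1) index true wi
    else
      if new = true ∧ index = wi then (some c, index, new)
      else aInner rest (c + 1) index false wi

-- outer loop of A: for row in range(len(grid)): …
def aOuter (rows : List (List Char)) (r : Int) (index : Int) (new : Bool) (wi : Int) :
    Option (Int × Int) :=
  match rows with
  | [] => none
  | row :: rest =>
    match aInner row 0 index new wi with
    | (some c, _, _) => some (r, c)
    | (none, i', n') => aOuter rest (r + 1) i' n' wi

def dropquote_locate_word (grid : List String) (letters : List String) (word_index : Int) : Int × Int :=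
  match grid with
  | [] => (0, 0)  -- grid[-1] raises IndexError; excluded by Pre_
  | _ =>
    let rows := grid.map String.toList
    let rows' := rows.dropLast ++ [rows.getLastD [] ++ ['-']]  -- grid[-1] += '-' (restored at the end)
    (aOuter rows' 0 0 true word_index).getD (0, 0)  -- none = ValueError; excluded by Pre_

-- ===== PORT B =====
-- starts = [i for i, (prev, ch) in enumerate(zip('-' + s, s)) if ch != '-' and prev == '-']
def bStarts (s : List Char) : List Int :=
  (PySem.List.enumerate (List.zip ('-' :: s) s) 0).filterMap
    (fun x => if x.2.2 ≠ '-' ∧ x.2.1 = '-' then some x.1 else none)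

-- for r, row in enumerate(grid): if p < len(row): return r, p ; p -= len(row)
def bLoc (rows : List (List Char)) (r : Int) (p : Int) : Int × Int :=
  match rows with
  | [] => (0, 0)  -- Source B falls off the loop (None); unreachable under Pre_
  | row :: rest => if p < (row.length : Int) then (r, p) else bLoc rest (r + 1) (p - row.length)

def dropquote_locate_word_alt (grid : List String) (letters : List String) (word_index : Int) : Int × Int :=
  let s := (grid.map String.toList).flatten
  let starts := bStarts s
  if 0 ≤ word_index ∧ word_index < (starts.length : Int) then
    bLoc (grid.map String.toList) 0 (starts.getD word_index.toNat 0)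
  else (0, 0)  -- raise ValueError; excluded by Pre_

-- ===== PRECONDITION & SPEC =====
-- word-start offsets of the flattened grid, as a spec (used only by Pre_ and the lemmas)
def wsL (l : List Char) (new : Bool) (i : Int) : List Int :=
  match l with
  | [] => []
  | c :: t =>
    if c = '-' then wsL t true (i + 1)
    else if new then i :: wsL t false (i + 1) else wsL t false (i + 1)

-- Pre_ excludes exactly the inputs where A raises: the empty grid (IndexError on grid[-1]) and a
-- word_index that is negative or ≥ the number of words (ValueError).
def Pre_dropquote_locate_word (grid : List String) (letters : List String) (word_index : Int) : Prop :=
  grid ≠ [] ∧ 0 ≤ word_index ∧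
    word_index < ((wsL ((grid.map String.toList).flatten) true 0).length : Int)
instance (grid : List String) (letters : List String) (word_index : Int) : Decidable (Pre_dropquote_locate_word grid letters word_index) := by unfold Pre_dropquote_locate_word; infer_instance

def pvWitness_dropquote_locate_word : List String × List String × Int := (["ab-c", "d-ef"], [], 1)

def Spec_dropquote_locate_word (grid : List String) (letters : List String) (word_index : Int) (out : Int × Int) : Prop := out = dropquote_locate_word_alt grid letters word_index
instance (grid : List String) (letters : List String) (word_index : Int) (out : Int × Int) : Decidable (Spec_dropquote_locate_word grid letters word_index out) := by unfold Spec_dropquote_locate_word; infer_instance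

-- ===== CLAIM (what is proved, stated in full; the proofs are below) =====
def Claim_equal_dropquote_locate_word : Prop := ∀ (grid : List String) (letters : List String) (word_index : Int), Dom_dropquote_locate_word grid letters word_index → Pre_dropquote_locate_word grid letters word_index → Spec_dropquote_locate_word grid letters word_index (dropquote_locate_word grid letters word_index)

-- ===== LEMMAS AND PROOFS =====

-- end-of-word count and final `new` flag of A's scan over a chunk, given the initial flag
def endC (l : List Char) (new : Bool) : Int :=
  match l with
  | [] => 0
  | c :: t => if c = '-' then (if new then 0 else 1) + endC t true else endC t false

def finNew (l : List Char) (new : Bool) : Bool :=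
  match l with
  | [] => new
  | c :: t => if c = '-' then finNew t true else finNew t false

def adj (new : Bool) : Int := if new then 0 else 1

theorem wsL_append (a b : List Char) (new : Bool) (i : Int) :
    wsL (a ++ b) new i = wsL a new i ++ wsL b (finNew a new) (i + (a.length : Int)) := by
  induction a generalizing new i with
  | nil => simp [wsL, finNew]
  | cons c t ih =>
    simp only [wsL, finNew, List.cons_append, List.length_cons]
    by_cases hc : c = '-'
    · simp [hc, ih]
      ring_nf
    · by_cases hn : new
      · simp [hc, hn, ih]
        ring_nf
      · simp [hc, hn, ih]
        ring_nf

theorem wsL_bounds (t : List Char) (new : Bool) (i p : Int) (h : p ∈ wsL t new i) :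
    i ≤ p ∧ p < i + (t.length : Int) := by
  induction t generalizing new i with
  | nil => simp [wsL] at h
  | cons c t ih =>
    simp only [wsL] at h
    by_cases hc : c = '-'
    · simp [hc] at h
      have := ih true (i+1) h
      simp only [List.length_cons]
      push_cast
      omega
    · by_cases hn : new
      · simp [hc, hn] at h
        rcases h with h | h
        · simp only [List.length_cons]; push_cast; omega
        · have := ih false (i+1) h
          simp only [List.length_cons]; push_cast; omega
      · simp [hc, hn] at h
        have := ih false (i+1) h
        simp only [List.length_cons]; push_cast; omega

theorem wsL_length_indep (t : List Char) (new : Bool) (i j : Int) :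
    (wsL t new i).length = (wsL t new j).length := by
  induction t generalizing new i j with
  | nil => simp [wsL]
  | cons c t ih =>
    by_cases hc : c = '-'
    · simp [wsL, hc]
      exact ih true (i+1) (j+1)
    · by_cases hn : new
      · simp [wsL, hc, hn]
        exact ih false (i+1) (j+1)
      · simp [wsL, hc, hn]
        exact ih false (i+1) (j+1)

theorem endC_adj (t : List Char) (new : Bool) (i : Int) :
    endC t new + adj (finNew t new) = adj new + ((wsL t new i).length : Int) := by
  induction t generalizing new i with
  | nil => simp [endC, finNew, wsL]
  | cons c t ih =>
    by_cases hc : c = '-'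
    · by_cases hn : new
      · simp [endC, finNew, wsL, hc, hn, ih true (i+1)]
      · simp only [endC, finNew, wsL, hc, hn, if_true, Bool.false_eq_true, if_false, if_pos rfl]
        have h1 := ih true (i+1)
        have h2 := wsL_length_indep t true (i+1) (1+i)
        simp [adj] at h1 ⊢
        omega
    · by_cases hn : new
      · simp [endC, finNew, wsL, hc, hn]
        have := ih false (i+1)
        simp [adj] at this ⊢
        push_cast
        omega
      · simp [endC, finNew, wsL, hc, hn, ih false (i+1)]

theorem aInner_eq (t : List Char) (c index : Int) (new : Bool) (wi : Int) :
    aInner t c index new wi =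
      if 0 ≤ wi - index - adj new ∧ (wi - index - adj new).toNat < (wsL t new c).length then
        (some ((wsL t new c).getD (wi - index - adj new).toNat 0), wi, true)
      else (none, index + endC t new, finNew t new) := by
  induction t generalizing c index new with
  | nil =>
    simp [aInner, wsL, endC, finNew]
  | cons ch rest ih =>
    by_cases hc : ch = '-'
    · by_cases hn : new
      · have hstep : aInner (ch :: rest) c index new wi = aInner rest (c + 1) index true wi := by
          simp [aInner, hc, hn]
        rw [hstep, ih]
        simp only [wsL, endC, finNew, hc, if_pos rfl, hn]
        split_ifs <;> simp [hn]
      · have hnf : new = false := by cases new <;> simp_all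
        subst hnf
        have hstep : aInner (ch :: rest) c index false wi
            = aInner rest (c + 1) (index + 1) true wi := by
          simp [aInner, hc]
        rw [hstep, ih]
        have e1 : wi - (index + 1) - adj true = wi - index - adj false := by simp [adj]; ring
        rw [e1]
        simp only [wsL, endC, finNew, hc, if_pos rfl]
        split_ifs <;> simp_all [add_assoc]
    · by_cases hf : new = true ∧ index = wi
      · obtain ⟨hn, hiw⟩ := hf
        subst hn; subst hiw
        have hstep : aInner (ch :: rest) c index true index = (some c, index, true) := by
          simp [aInner, hc]
        rw [hstep]
        have hl : wsL (ch :: rest) true c = c :: wsL rest false (c + 1) := by simp [wsL, hc]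
        rw [hl]
        simp [adj]
      · by_cases hn : new
        · subst hn
          have hiw : index ≠ wi := fun h => hf ⟨rfl, h⟩
          have hstep : aInner (ch :: rest) c index true wi
              = aInner rest (c + 1) index false wi := by
            simp [aInner, hc, hiw]
          rw [hstep, ih]
          have hl : wsL (ch :: rest) true c = c :: wsL rest false (c + 1) := by
            simp [wsL, hc]
          have hE : endC (ch :: rest) true = endC rest false := by simp [endC, hc]
          have hF : finNew (ch :: rest) true = finNew rest false := by simp [finNew, hc]
          rw [hl, hE, hF]
          set L := wsL rest false (c + 1) with hLdef
          by_cases h1 : 0 ≤ wi - index - adj false ∧ (wi - index - adj false).toNat < L.length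
          · have h2 : 0 ≤ wi - index - adj true ∧ (wi - index - adj true).toNat < (c :: L).length := by
              simp [adj] at h1 ⊢
              omega
            rw [if_pos h1, if_pos h2]
            have hk : (wi - index - adj true).toNat = (wi - index - adj false).toNat + 1 := by
              simp [adj] at h1 ⊢
              omega
            rw [hk]
            simp
          · have h2 : ¬(0 ≤ wi - index - adj true ∧ (wi - index - adj true).toNat < (c :: L).length) := by
              simp [adj] at h1 ⊢
              intro hge
              omega
            rw [if_neg h1, if_neg h2]
        · have hnf : new = false := by cases new <;> simp_all
          subst hnf
          have hstep : aInner (ch :: rest) c index false wi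
              = aInner rest (c + 1) index false wi := by
            simp [aInner, hc]
          rw [hstep, ih]
          simp [wsL, endC, finNew, hc]

theorem wsL_shift (t : List Char) (new : Bool) (i d : Int) :
    wsL t new (i + d) = (wsL t new i).map (· + d) := by
  induction t generalizing new i with
  | nil => simp [wsL]
  | cons c rest ih =>
    have e : i + d + 1 = (i + 1) + d := by ring
    by_cases hc : c = '-'
    · simp [wsL, hc, e, ih]
    · by_cases hn : new
      · simp [wsL, hc, hn, e, ih]
      · simp [wsL, hc, hn, e, ih]

theorem aOuter_eq (rows : List (List Char)) (r index : Int) (new : Bool) (wi : Int) :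
    aOuter rows r index new wi =
      if 0 ≤ wi - index - adj new ∧ (wi - index - adj new).toNat < (wsL rows.flatten new 0).length then
        some (bLoc rows r ((wsL rows.flatten new 0).getD (wi - index - adj new).toNat 0))
      else none := by
  induction rows generalizing r index new with
  | nil => simp [aOuter, wsL]
  | cons row rest ih =>
    have hflat : wsL ((row :: rest).flatten) new 0
        = wsL row new 0 ++ (wsL rest.flatten (finNew row new) 0).map (· + (row.length : Int)) := by
      rw [List.flatten_cons, wsL_append]
      congr 1
      have h := wsL_shift rest.flatten (finNew row new) 0 (row.length : Int)
      simpa using h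
    rw [hflat]
    simp only [aOuter]
    rw [aInner_eq]
    by_cases h1 : 0 ≤ wi - index - adj new ∧
        (wi - index - adj new).toNat < (wsL row new 0).length
    · rw [if_pos h1]
      show some (r, (wsL row new 0).getD (wi - index - adj new).toNat 0) = _
      have hlt := h1.2
      have hcond : 0 ≤ wi - index - adj new ∧ (wi - index - adj new).toNat <
          (wsL row new 0 ++ (wsL rest.flatten (finNew row new) 0).map (· + (row.length : Int))).length := by
        refine ⟨h1.1, ?_⟩
        simp only [List.length_append]
        omega
      rw [if_pos hcond]
      have hgA : (wsL row new 0 ++ (wsL rest.flatten (finNew row new) 0).map (· + (row.length : Int))).getD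
          (wi - index - adj new).toNat 0 = (wsL row new 0).getD (wi - index - adj new).toNat 0 := by
        rw [List.getD_eq_getElem _ _ hcond.2, List.getD_eq_getElem _ _ hlt,
          List.getElem_append_left hlt]
      rw [hgA]
      have hmem : (wsL row new 0).getD (wi - index - adj new).toNat 0 ∈ wsL row new 0 := by
        rw [List.getD_eq_getElem _ _ hlt]
        exact List.getElem_mem hlt
      have hb := wsL_bounds row new 0 _ hmem
      simp only [bLoc]
      rw [if_pos (by omega)]
    · rw [if_neg h1]
      show aOuter rest (r + 1) (index + endC row new) (finNew row new) wi = _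
      rw [ih]
      have hadj := endC_adj row new 0
      by_cases h2 : 0 ≤ wi - (index + endC row new) - adj (finNew row new) ∧
          (wi - (index + endC row new) - adj (finNew row new)).toNat <
            (wsL rest.flatten (finNew row new) 0).length
      · rw [if_pos h2]
        have hcond : 0 ≤ wi - index - adj new ∧ (wi - index - adj new).toNat <
            (wsL row new 0 ++ (wsL rest.flatten (finNew row new) 0).map (· + (row.length : Int))).length := by
          simp only [List.length_append, List.length_map]
          omega
        rw [if_pos hcond]
        have hk : (wi - index - adj new).toNat
            = (wsL row new 0).length + (wi - (index + endC row new) - adj (finNew row new)).toNat := by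
          omega
        have hgB : (wsL row new 0 ++ (wsL rest.flatten (finNew row new) 0).map (· + (row.length : Int))).getD
            (wi - index - adj new).toNat 0
            = (wsL rest.flatten (finNew row new) 0).getD
                (wi - (index + endC row new) - adj (finNew row new)).toNat 0 + (row.length : Int) := by
          rw [List.getD_eq_getElem _ _ hcond.2, List.getD_eq_getElem _ _ h2.2,
            List.getElem_append_right (by omega)]
          simp only [List.getElem_map]
          have he : (wi - index - adj new).toNat - (wsL row new 0).length
              = (wi - (index + endC row new) - adj (finNew row new)).toNat := by omega
          rw [getElem_congr_idx he]
        rw [hgB]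
        have hmem : (wsL rest.flatten (finNew row new) 0).getD
            (wi - (index + endC row new) - adj (finNew row new)).toNat 0
            ∈ wsL rest.flatten (finNew row new) 0 := by
          rw [List.getD_eq_getElem _ _ h2.2]
          exact List.getElem_mem h2.2
        have hb := wsL_bounds rest.flatten (finNew row new) 0 _ hmem
        simp only [bLoc]
        rw [if_neg (by omega)]
        have he : (wsL rest.flatten (finNew row new) 0).getD
            (wi - (index + endC row new) - adj (finNew row new)).toNat 0 + (row.length : Int)
            - (row.length : Int)
            = (wsL rest.flatten (finNew row new) 0).getD
                (wi - (index + endC row new) - adj (finNew row new)).toNat 0 := by ring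
        rw [he]
      · rw [if_neg h2]
        have hcond : ¬(0 ≤ wi - index - adj new ∧ (wi - index - adj new).toNat <
            (wsL row new 0 ++ (wsL rest.flatten (finNew row new) 0).map (· + (row.length : Int))).length) := by
          simp only [List.length_append, List.length_map]
          intro hco
          apply h2
          constructor
          · omega
          · omega
        rw [if_neg hcond]

theorem bStartsAux (s : List Char) (prev : Char) (i : Int) :
    (PySem.List.enumerate (List.zip (prev :: s) s) i).filterMap
      (fun x => if x.2.2 ≠ '-' ∧ x.2.1 = '-' then some x.1 else none)
      = wsL s (decide (prev = '-')) i := by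
  induction s generalizing prev i with
  | nil => simp [wsL, PySem.List.enumerate]
  | cons c t ih =>
    rw [List.zip_cons_cons, PySem.List.enumerate_cons]
    rw [List.filterMap_cons]
    by_cases hc : c = '-'
    · by_cases hp : prev = '-' <;> simp [wsL, hc, hp, ih]
    · by_cases hp : prev = '-' <;> simp [wsL, hc, hp, ih]

theorem bStarts_eq (s : List Char) :
    bStarts s = wsL s true 0 := by
  have h := bStartsAux s '-' 0
  simpa [bStarts] using h

theorem flatten_mod (rows : List (List Char)) (h : rows ≠ []) :
    (rows.dropLast ++ [rows.getLastD [] ++ ['-']]).flatten = rows.flatten ++ ['-'] := by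
  induction rows with
  | nil => exact absurd rfl h
  | cons x rest ih =>
    cases rest with
    | nil => simp
    | cons y t =>
      have hne : (y :: t : List (List Char)) ≠ [] := by simp
      have ih2 := ih hne
      have h1 : ((x :: y :: t : List (List Char)).dropLast) = x :: ((y :: t : List (List Char)).dropLast) := rfl
      have h2 : ((x :: y :: t : List (List Char)).getLastD []) = ((y :: t : List (List Char)).getLastD []) := rfl
      rw [h1, h2, List.cons_append, List.flatten_cons, ih2]
      simp [List.append_assoc]

theorem bLoc_mod (rows : List (List Char)) (h : rows ≠ []) (r p : Int)
    (h0 : 0 ≤ p) (hlt : p < (rows.flatten.length : Int)) :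
    bLoc (rows.dropLast ++ [rows.getLastD [] ++ ['-']]) r p = bLoc rows r p := by
  induction rows generalizing r p with
  | nil => exact absurd rfl h
  | cons x rest ih =>
    cases rest with
    | nil =>
      have h1 : (([x] : List (List Char)).dropLast ++ [([x] : List (List Char)).getLastD [] ++ ['-']])
          = [x ++ ['-']] := rfl
      rw [h1]
      simp only [List.flatten_cons, List.flatten_nil, List.append_nil] at hlt
      simp only [bLoc]
      rw [if_pos (by simp only [List.length_append, List.length_cons, List.length_nil]; push_cast; omega),
        if_pos (by omega)]
    | cons y t =>
      have hne : (y :: t : List (List Char)) ≠ [] := by simp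
      simp only [List.dropLast_cons_of_ne_nil hne, List.cons_append, bLoc]
      by_cases hx : p < (x.length : Int)
      · rw [if_pos hx, if_pos hx]
      · rw [if_neg hx, if_neg hx]
        have hgl : (x :: y :: t : List (List Char)).getLastD [] = (y :: t : List (List Char)).getLastD [] := by
          rfl
        rw [hgl] at *
        apply ih hne
        · omega
        · simp only [List.flatten_cons, List.length_append] at hlt ⊢
          push_cast at hlt ⊢
          omega

-- ===== VERDICT (by name: the statement is the Claim_ definition above) =====
theorem dropquote_locate_word_spec : Claim_equal_dropquote_locate_word := by
  intro grid letters wi hdom hpre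
  obtain ⟨hne, h0, hlt⟩ := hpre
  unfold Spec_dropquote_locate_word
  cases grid with
  | nil => exact absurd rfl hne
  | cons g gs =>
    simp only [dropquote_locate_word, dropquote_locate_word_alt]
    set rows := ((g :: gs : List String).map String.toList) with hrows
    have hrne : rows ≠ [] := by simp [hrows]
    have hflat' : (rows.dropLast ++ [rows.getLastD [] ++ ['-']]).flatten
        = rows.flatten ++ ['-'] := flatten_mod rows hrne
    have hws : wsL (rows.flatten ++ ['-']) true 0 = wsL rows.flatten true 0 := by
      rw [wsL_append]
      simp [wsL]
    rw [aOuter_eq, hflat', hws]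
    have hcond : 0 ≤ wi - 0 - adj true ∧ (wi - 0 - adj true).toNat < (wsL rows.flatten true 0).length := by
      have ha : adj true = 0 := rfl
      rw [ha]
      constructor
      · omega
      · omega
    rw [if_pos hcond]
    rw [bStarts_eq]
    have hcond2 : 0 ≤ wi ∧ wi < ((wsL rows.flatten true 0).length : Int) := ⟨h0, hlt⟩
    rw [if_pos hcond2]
    simp only [Option.getD_some]
    have he : (wi - 0 - adj true).toNat = wi.toNat := by
      have ha : adj true = 0 := rfl
      rw [ha]
      omega
    rw [he]
    have hmem : (wsL rows.flatten true 0).getD wi.toNat 0 ∈ wsL rows.flatten true 0 := by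
      rw [List.getD_eq_getElem _ _ (by omega)]
      exact List.getElem_mem (by omega)
    have hb := wsL_bounds rows.flatten true 0 _ hmem
    rw [bLoc_mod rows hrne 0 _ (by omega) (by omega)]
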